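-- pv_equiv track=rewrite | github.com/laiarodrigo/Thesis | src/opus_pipeline.py | _interior_uncovered
-- ===== SOURCE A (Python) =====
-- from typing import Optional, Dict, Any, Tuple, List, Iterable, Union
-- from typing import List, Tuple
--
-- def _interior_uncovered(tokens: List[str], covered: set) -> List[Tuple[int,int]]:
--     runs, cur = [], []
--     for i in range(len(tokens)):
--         if i not in covered: cur.append(i)
--         elif cur: runs.append((cur[0], cur[-1])); cur=[]
--     if cur: runs.append((cur[0], cur[-1]))
--     n = len(tokens)
--     return [(i0,i1) for (i0,i1) in runs if i0>0 and i1<n-1]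
-- ===== SOURCE B (Python) =====
-- from typing import List, Tuple
--
-- def _interior_uncovered(tokens: List[str], covered: set) -> List[Tuple[int,int]]:
--     n = len(tokens)
--     cs = sorted(i for i in covered if 0 <= i < n)
--     return [(a + 1, b - 1) for a, b in zip(cs, cs[1:]) if b - a > 1]
-- ===== Notes on version B (the rewrite author's own statement) =====
-- stated objective: simpler
-- what changed: Instead of scanning every token index while buffering uncovered runs in a list and post-filtering the interior ones, B sorts the in-range covered indices and emits (a+1, b-1) for each consecutive pair with a gap, so no run buffer and no filtering pass are needed.
import Mathlib
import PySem

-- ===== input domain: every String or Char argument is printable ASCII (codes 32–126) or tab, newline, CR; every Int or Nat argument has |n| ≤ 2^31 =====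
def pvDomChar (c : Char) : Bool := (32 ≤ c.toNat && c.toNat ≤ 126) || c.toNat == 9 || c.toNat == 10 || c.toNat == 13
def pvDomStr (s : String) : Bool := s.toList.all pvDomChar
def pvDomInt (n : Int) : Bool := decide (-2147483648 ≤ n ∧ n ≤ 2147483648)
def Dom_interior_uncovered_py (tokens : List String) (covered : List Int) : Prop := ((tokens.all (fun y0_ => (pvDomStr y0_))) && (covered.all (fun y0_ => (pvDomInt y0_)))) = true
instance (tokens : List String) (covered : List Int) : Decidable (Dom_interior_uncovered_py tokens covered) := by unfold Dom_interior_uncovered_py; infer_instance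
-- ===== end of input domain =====

-- B replaces A's scan over every token index (buffering uncovered runs, then post-filtering
-- the interior ones) by walking the gaps between consecutive sorted in-range covered indices;
-- objective: simpler.

-- ===== PORT A =====
-- one loop iteration of A: `if i not in covered: cur.append(i) elif cur: runs.append((cur[0], cur[-1])); cur=[]`
-- cur[0]/cur[-1] are ported as headD/getLastD; exact because they are guarded by cur ≠ [].
def iuStep (covered : List Int) (st : List (Int × Int) × List Int) (i : Int) : List (Int × Int) × List Int :=
  if ¬ covered.contains i then (st.1, st.2 ++ [i])
  else if st.2 ≠ [] then (st.1 ++ [(st.2.headD 0, st.2.getLastD 0)], [])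
  else st

def interior_uncovered_py (tokens : List String) (covered : List Int) : List (Int × Int) :=
  let st := (PySem.List.pyRange 0 (tokens.length : Int) 1).foldl (iuStep covered) ([], [])
  let runs := if st.2 ≠ [] then st.1 ++ [(st.2.headD 0, st.2.getLastD 0)] else st.1
  let n : Int := (tokens.length : Int)
  runs.filter (fun p => decide (p.1 > 0) && decide (p.2 < n - 1))

-- ===== PORT B =====
def interior_uncovered_py_alt (tokens : List String) (covered : List Int) : List (Int × Int) :=
  let n : Int := (tokens.length : Int)
  let cs := PySem.List.sorted (covered.filter (fun i => decide (0 ≤ i) && decide (i < n))) (fun x => x) false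
  (cs.zip cs.tail).filterMap (fun ab => if ab.2 - ab.1 > 1 then some (ab.1 + 1, ab.2 - 1) else none)

-- ===== PRECONDITION & SPEC =====
def Spec_interior_uncovered_py (tokens : List String) (covered : List Int) (out : List (Int × Int)) : Prop := out = interior_uncovered_py_alt tokens covered
instance (tokens : List String) (covered : List Int) (out : List (Int × Int)) : Decidable (Spec_interior_uncovered_py tokens covered out) := by unfold Spec_interior_uncovered_py; infer_instance

-- ===== CLAIM (what is proved, stated in full; the proofs are below) =====
def Claim_equal_interior_uncovered_py : Prop := ∀ (tokens : List String) (covered : List Int), Dom_interior_uncovered_py tokens covered → Spec_interior_uncovered_py tokens covered (interior_uncovered_py tokens covered)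

-- ===== LEMMAS AND PROOFS =====

-- recursive form of B's zip comprehension
def gapsRec : List Int → List (Int × Int)
  | a :: b :: t => (if b - a > 1 then [(a + 1, b - 1)] else []) ++ gapsRec (b :: t)
  | _ => []

lemma gaps_eq (cs : List Int) :
    (cs.zip cs.tail).filterMap (fun ab => if ab.2 - ab.1 > 1 then some (ab.1 + 1, ab.2 - 1) else none)
      = gapsRec cs := by
  match cs with
  | [] => rfl
  | [a] => rfl
  | a :: b :: t =>
    have ih := gaps_eq (b :: t)
    simp only [List.tail, List.zip_cons_cons, List.filterMap_cons, gapsRec] at *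
    split <;> simp_all

-- last covered index strictly below m, scanning upward
def lastC (covered : List Int) : Nat → Option Int
  | 0 => none
  | m + 1 => if covered.contains (m : Int) then some (m : Int) else lastC covered m

def startC (covered : List Int) (m : Nat) : Int := (lastC covered m).elim 0 (· + 1)

-- completed runs of A after scanning indices [0, m)
def runsF (covered : List Int) : Nat → List (Int × Int)
  | 0 => []
  | m + 1 =>
    if covered.contains (m : Int) ∧ startC covered m < m then
      runsF covered m ++ [(startC covered m, (m : Int) - 1)]
    else runsF covered m

def csF (covered : List Int) (m : Nat) : List Int :=
  PySem.List.sorted (covered.filter (fun i => decide (0 ≤ i) && decide (i < (m : Int)))) (fun x => x) false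

lemma lastC_bounds (covered : List Int) (m : Nat) :
    ∀ l, lastC covered m = some l → 0 ≤ l ∧ l < (m : Int) := by
  induction m with
  | zero => intro l h; simp [lastC] at h
  | succ m ih =>
    intro l h
    simp only [lastC] at h
    split at h
    · cases h; exact ⟨by positivity, by push_cast; omega⟩
    · have := ih l h; push_cast at *; omega

lemma startC_bounds (covered : List Int) (m : Nat) :
    0 ≤ startC covered m ∧ startC covered m ≤ (m : Nat) := by
  unfold startC
  cases h : lastC covered m with
  | none => simp [Option.elim]
  | some l => have := lastC_bounds covered m l h; simp [Option.elim]; omega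

-- A's fold state after m steps
lemma state_char (covered : List Int) (m : Nat) :
    (PySem.List.pyRange 0 (m : Int) 1).foldl (iuStep covered) ([], [])
      = (runsF covered m, PySem.List.pyRange (startC covered m) (m : Int) 1) := by
  induction m with
  | zero => simp [runsF, startC, lastC, Option.elim]
  | succ m ih =>
    have hm : (0 : Int) ≤ (m : Int) := by positivity
    have hb := startC_bounds covered m
    rw [show ((m + 1 : Nat) : Int) = (m : Int) + 1 by push_cast; ring,
        PySem.List.pyRange_one_succ_right hm, List.foldl_append, ih]
    simp only [List.foldl_cons, List.foldl_nil, iuStep]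
    by_cases hc : covered.contains (m : Int)
    · have hmem : (m : Int) ∈ covered := by simpa using hc
      simp only [hc, not_true, if_false, ite_not]
      by_cases hne : startC covered m < (m : Int)
      · have hnonnil : PySem.List.pyRange (startC covered m) (m : Int) 1 ≠ [] := by
          rw [← List.length_pos_iff, PySem.List.length_pyRange_one]; omega
        have hcons : PySem.List.pyRange (startC covered m) (m : Int) 1
            = startC covered m :: PySem.List.pyRange (startC covered m + 1) (m : Int) 1 :=
          PySem.List.pyRange_one_cons hne
        have hlast : (PySem.List.pyRange (startC covered m) (m : Int) 1).getLastD 0 = (m : Int) - 1 := by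
          rw [show (m : Int) = ((m : Int) - 1) + 1 by ring,
              PySem.List.pyRange_one_succ_right (by omega)]
          simp
        have hhead : (PySem.List.pyRange (startC covered m) (m : Int) 1).headD 0 = startC covered m := by
          rw [hcons]; rfl
        have hrun : runsF covered (m + 1) = runsF covered m ++ [(startC covered m, (m : Int) - 1)] := by
          simp [runsF, hmem, hne]
        have hs : startC covered (m + 1) = (m : Int) + 1 := by
          simp [startC, lastC, hmem, Option.elim]
        rw [if_neg (by simp [hnonnil]), hhead, hlast, hrun, hs]
        rw [PySem.List.pyRange_one_eq_nil (by omega)]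
      · have hnil : PySem.List.pyRange (startC covered m) (m : Int) 1 = [] :=
          PySem.List.pyRange_one_eq_nil (by omega)
        have hrun : runsF covered (m + 1) = runsF covered m := by simp [runsF, hne]
        have hs : startC covered (m + 1) = (m : Int) + 1 := by
          simp [startC, lastC, hmem, Option.elim]
        rw [hnil, if_pos rfl, hrun, hs]
        rw [PySem.List.pyRange_one_eq_nil (by omega)]
    · have hmem : (m : Int) ∉ covered := by simpa using hc
      simp only [hc]
      have hs : startC covered (m + 1) = startC covered m := by
        simp [startC, lastC, hmem]
      have hrun : runsF covered (m + 1) = runsF covered m := by simp [runsF, hmem]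
      rw [hs, hrun, ← PySem.List.pyRange_one_succ_right (by omega)]
      norm_cast

-- the sorted in-range covered list grows by the copies of m at its right end
lemma csF_zero (covered : List Int) : csF covered 0 = [] := by
  have hf : covered.filter (fun i => decide (0 ≤ i) && decide (i < ((0:Nat) : Int))) = [] := by
    apply List.filter_eq_nil_iff.mpr; intro a _; simp
  unfold csF; rw [hf]; rfl

lemma runsF_succ (covered : List Int) (m : Nat) :
    runsF covered (m + 1) =
      if covered.contains (m : Int) ∧ startC covered m < (m : Int) then
        runsF covered m ++ [(startC covered m, (m : Int) - 1)]
      else runsF covered m := rfl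

lemma csF_succ (covered : List Int) (m : Nat) :
    csF covered (m + 1) = csF covered m ++ List.replicate (covered.count (m : Int)) (m : Int) := by
  have hcast : ((m + 1 : Nat) : Int) = (m : Int) + 1 := by push_cast; ring
  set l := covered.filter (fun i => decide (0 ≤ i) && decide (i < ((m + 1 : Nat) : Int))) with hl
  have h2 : l.filter (fun a => decide (a < (m : Int))) =
      covered.filter (fun i => decide (0 ≤ i) && decide (i < (m : Int))) := by
    rw [hl, List.filter_filter]
    apply List.filter_congr
    intro a _
    rw [hcast]
    by_cases h0 : (0:Int) ≤ a
    · by_cases h1 : a < (m : Int)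
      · simp [h0, h1, show a < (m : Int) + 1 by omega]
      · simp [h1]
    · simp [h0]
  have h3 : l.filter (fun a => !decide (a < (m : Int))) = covered.filter (· == (m : Int)) := by
    rw [hl, List.filter_filter]
    apply List.filter_congr
    intro a _
    rw [hcast]
    by_cases h1 : a = (m : Int)
    · subst h1
      simp [show (0:Int) ≤ (m : Int) by positivity, show (m : Int) < (m : Int) + 1 by omega]
    · by_cases h0 : (0:Int) ≤ a
      · by_cases h2 : a < (m : Int)
        · simp [h2, h1]
        · simp [h2, show a ≤ (m : Int) ↔ a = (m : Int) by omega, h1]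
      · simp [h0, h1]
  have h4 : covered.filter (· == (m : Int)) = List.replicate (covered.count (m : Int)) (m : Int) :=
    List.filter_beq _
  apply PySem.List.sorted_id_eq_of_perm_of_pairwise
  · have hperm1 : (csF covered m ++ List.replicate (covered.count (m : Int)) (m : Int)).Perm
        (l.filter (fun a => decide (a < (m : Int))) ++ l.filter (fun a => !decide (a < (m : Int)))) := by
      rw [h2, h3, h4]
      exact (PySem.List.sorted_perm _ _ _).append (List.Perm.refl _)
    exact hperm1.trans (List.filter_append_perm _ l)
  · rw [List.pairwise_append]
    refine ⟨PySem.List.sorted_pairwise _ _, List.pairwise_replicate.mpr (Or.inr le_rfl), ?_⟩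
    intro a ha b hb
    rw [List.eq_of_mem_replicate hb]
    have := (List.mem_filter.mp ((PySem.List.mem_sorted _ _ _ _).mp ha)).2
    simp at this
    omega

lemma gapsRec_replicate (k : Nat) (v : Int) : gapsRec (List.replicate k v) = [] := by
  induction k with
  | zero => rfl
  | succ k ih =>
    cases k with
    | zero => rfl
    | succ k => simp only [List.replicate, gapsRec] at *; simp [ih]

lemma gapsRec_append (xs : List Int) (l : Int) (ys : List Int) (h : xs.getLast? = some l) :
    gapsRec (xs ++ ys) = gapsRec xs ++ gapsRec (l :: ys) := by
  induction xs with
  | nil => simp at h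
  | cons a t ih =>
    cases t with
    | nil => simp at h; subst h; simp [gapsRec]
    | cons b t' =>
      have h' : (b :: t').getLast? = some l := by rwa [List.getLast?_cons_cons] at h
      have ih' := ih h'
      simp only [List.cons_append] at ih'
      simp only [List.cons_append, gapsRec, ih', List.append_assoc]

lemma getLast?_csF (covered : List Int) (m : Nat) :
    (csF covered m).getLast? = lastC covered m := by
  induction m with
  | zero =>
    have h0 : csF covered 0 = [] := by
      have hf : covered.filter (fun i => decide (0 ≤ i) && decide (i < ((0:Nat) : Int))) = [] := by
        apply List.filter_eq_nil_iff.mpr; intro a _; simp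
      unfold csF; rw [hf]; rfl
    simp [h0, lastC]
  | succ m ih =>
    rw [csF_succ]
    by_cases hc : covered.contains (m : Int)
    · have hmem : (m : Int) ∈ covered := by simpa using hc
      have hk : covered.count (m : Int) ≠ 0 := by
        simpa [List.count_eq_zero] using hmem
      rw [List.getLast?_append_of_ne_nil _ (by simp [hk]), List.getLast?_replicate]
      simp [lastC, hmem, hk]
    · have hmem : (m : Int) ∉ covered := by simpa using hc
      have hk : covered.count (m : Int) = 0 := List.count_eq_zero.mpr hmem
      simp [hk, lastC, hmem, ih]

lemma filtered_runs (covered : List Int) (m : Nat) :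
    (runsF covered m).filter (fun p => decide (p.1 > 0)) = gapsRec (csF covered m) := by
  induction m with
  | zero => simp [runsF, csF_zero, gapsRec]
  | succ m ih =>
    rw [csF_succ, runsF_succ]
    by_cases hc : covered.contains (m : Int)
    · have hmem : (m : Int) ∈ covered := by simpa using hc
      have hk : covered.count (m : Int) ≠ 0 := by simpa [List.count_eq_zero] using hmem
      obtain ⟨k', hk'⟩ := Nat.exists_eq_succ_of_ne_zero hk
      cases hlc : lastC covered m with
      | none =>
        have hcs : csF covered m = [] := by
          rw [← List.getLast?_eq_none_iff, getLast?_csF, hlc]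
        have hs : startC covered m = 0 := by simp [startC, hlc, Option.elim]
        have hrhs : gapsRec (csF covered m ++ List.replicate (covered.count (m : Int)) (m : Int))
            = [] := by rw [hcs, List.nil_append, gapsRec_replicate]
        rw [hrhs]
        split
        · rw [List.filter_append, hs, ih, hcs]
          simp [gapsRec]
        · rw [ih, hcs]; rfl
      | some lc =>
        have hlb := lastC_bounds covered m lc hlc
        have hs : startC covered m = lc + 1 := by simp [startC, hlc, Option.elim]
        have hlast : (csF covered m).getLast? = some lc := by rw [getLast?_csF, hlc]
        rw [gapsRec_append _ _ _ hlast, hk', List.replicate_succ]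
        have hrep : gapsRec (lc :: (m : Int) :: List.replicate k' (m : Int))
            = (if (m : Int) - lc > 1 then [(lc + 1, (m : Int) - 1)] else []) := by
          rw [show gapsRec (lc :: (m : Int) :: List.replicate k' (m : Int))
              = (if (m : Int) - lc > 1 then [(lc + 1, (m : Int) - 1)] else [])
                ++ gapsRec ((m : Int) :: List.replicate k' (m : Int)) from rfl]
          rw [show ((m : Int) :: List.replicate k' (m : Int)) = List.replicate (k' + 1) (m : Int) by
              rw [List.replicate_succ], gapsRec_replicate, List.append_nil]
        rw [hrep]
        by_cases hint : startC covered m < (m : Int)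
        · rw [if_pos ⟨hc, hint⟩, List.filter_append, ih, if_pos (by omega)]
          simp [hs, show (0:Int) < lc + 1 by omega]
        · rw [if_neg (by tauto), ih, if_neg (by omega)]
          simp
    · have hmem : (m : Int) ∉ covered := by simpa using hc
      have hk : covered.count (m : Int) = 0 := List.count_eq_zero.mpr hmem
      rw [if_neg (by simp [hmem]), hk, List.replicate_zero, List.append_nil, ih]

lemma runs_snd_lt (covered : List Int) (m : Nat) :
    ∀ p ∈ runsF covered m, p.2 < (m : Int) - 1 := by
  induction m with
  | zero => intro p hp; simp [runsF] at hp
  | succ m ih =>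
    intro p hp
    simp only [runsF] at hp
    split at hp
    · rcases List.mem_append.mp hp with h | h
      · have := ih p h; push_cast at *; omega
      · simp at h; subst h; push_cast; omega
    · have := ih p hp; push_cast at *; omega

-- ===== VERDICT (by name: the statement is the Claim_ definition above) =====
theorem interior_uncovered_py_spec : Claim_equal_interior_uncovered_py := by
  intro tokens covered _
  unfold Spec_interior_uncovered_py interior_uncovered_py interior_uncovered_py_alt
  rw [gaps_eq]
  set m := tokens.length with hm
  rw [state_char covered m]
  have hb := startC_bounds covered m
  by_cases hne : startC covered m < (m : Int)
  · have hnonnil : PySem.List.pyRange (startC covered m) (m : Int) 1 ≠ [] := by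
      rw [← List.length_pos_iff, PySem.List.length_pyRange_one]; omega
    have hlast : (PySem.List.pyRange (startC covered m) (m : Int) 1).getLastD 0 = (m : Int) - 1 := by
      rw [show (m : Int) = ((m : Int) - 1) + 1 by ring,
          PySem.List.pyRange_one_succ_right (by omega)]
      simp
    simp only [if_pos hnonnil, hlast]
    rw [List.filter_append]
    have : List.filter (fun p => decide (p.1 > 0) && decide (p.2 < (m : Int) - 1))
        [((PySem.List.pyRange (startC covered m) (m : Int) 1).headD 0, (m : Int) - 1)] = [] := by
      simp
    rw [this, List.append_nil]
    rw [show (List.filter (fun p => decide (p.1 > 0) && decide (p.2 < (m : Int) - 1)) (runsF covered m))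
        = List.filter (fun p => decide (p.1 > 0)) (runsF covered m) from ?_, filtered_runs]
    · rfl
    · apply List.filter_congr
      intro p hp
      have := runs_snd_lt covered m p hp
      simp [this]
  · have hnil : PySem.List.pyRange (startC covered m) (m : Int) 1 = [] :=
      PySem.List.pyRange_one_eq_nil (by omega)
    simp only [hnil, ne_eq, not_true_eq_false, if_false]
    rw [show (List.filter (fun p => decide (p.1 > 0) && decide (p.2 < (m : Int) - 1)) (runsF covered m))
        = List.filter (fun p => decide (p.1 > 0)) (runsF covered m) from ?_, filtered_runs]
    · rfl
    · apply List.filter_congr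
      intro p hp
      have := runs_snd_lt covered m p hp
      simp [this]
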